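-- pv_equiv track=rewrite | github.com/cyrustabatab/leetcode | daily_challenges/number_of_valid_words_for_each_puzzle.py | num_valid_words
-- ===== SOURCE A (Python) =====
-- def num_valid_words(words,puzzles):
--
--
--     first_letters = set(puzzle[0] for puzzle in puzzles)
--
--     words = [word for word in words if word[0] in first_letters]
--
--
--     valid_words = []
--     for puzzle in puzzles:
--         letters = set(puzzle)
--         num_words = 0
--         for word in words:
--             for i in range(1,len(word)):
--                 letter = word[i]
--                 if letter not in letters:
--                     break
--             else:
--                 num_words += 1
--         valid_words.append(num_words)
--
--
--     return valid_words
-- ===== SOURCE B (Python) =====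
-- def num_valid_words(words, puzzles):
--     first_letters = set(puzzle[0] for puzzle in puzzles)
--     # group words (whose first letter is some puzzle's first letter, as in the task)
--     # by the canonical string of the distinct letters of word[1:], counting multiplicity
--     counts = {}
--     for word in words:
--         if word[0] in first_letters:
--             key = "".join(sorted(set(word[1:])))
--             counts[key] = counts.get(key, 0) + 1
--     valid_words = []
--     for puzzle in puzzles:
--         letters = set(puzzle)
--         total = 0
--         for key, c in counts.items():
--             if all(ch in letters for ch in key):
--                 total += c
--         valid_words.append(total)
--     return valid_words
-- ===== Notes on version B (the rewrite author's own statement) =====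
-- stated objective: faster
-- what changed: Instead of re-scanning every word's letters for each puzzle, B builds once a counter keyed by the canonical string of each kept word's distinct suffix letters, and per puzzle sums the counts of the (few distinct) keys whose letters all lie in the puzzle.
import Mathlib
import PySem

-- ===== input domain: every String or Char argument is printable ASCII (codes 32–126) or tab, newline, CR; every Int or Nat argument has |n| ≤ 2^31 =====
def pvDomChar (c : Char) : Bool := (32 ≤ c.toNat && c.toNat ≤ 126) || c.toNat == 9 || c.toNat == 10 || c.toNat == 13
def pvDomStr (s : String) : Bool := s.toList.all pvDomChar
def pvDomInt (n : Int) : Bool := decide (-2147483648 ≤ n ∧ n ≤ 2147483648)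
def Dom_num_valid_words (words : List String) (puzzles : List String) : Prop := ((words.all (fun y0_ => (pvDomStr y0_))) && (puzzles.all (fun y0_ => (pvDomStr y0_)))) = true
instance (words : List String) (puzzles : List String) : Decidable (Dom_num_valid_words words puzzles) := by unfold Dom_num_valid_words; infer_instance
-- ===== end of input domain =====

-- B replaces A's per-puzzle scan of every word by a counter keyed on each word's canonical
-- suffix-letter set, built once; per puzzle it sums the counts of the fitting keys (faster).

-- ===== PORT A =====
-- inner 'for i in range(1, len(word)): … break / else:' loop of A: true = the loop completed
def pvAInner (letters : PySem.Set Char) (w : String) : List Int → Bool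
  | [] => true
  | i :: rest =>
    match PySem.Str.pyGet? w i with
    | some letter => if !(PySem.Set.contains letters letter) then false else pvAInner letters w rest
    | none => false  -- IndexError; unreachable since i < len(w)

def num_valid_words (words : List String) (puzzles : List String) : List Int :=
  -- 'puzzle[0]' raises on an empty puzzle; Pre_ excludes that, so the ' ' default is never used
  let first_letters : PySem.Set Char :=
    PySem.Set.ofList (puzzles.map (fun puzzle => (PySem.Str.pyGet? puzzle 0).getD ' '))
  let words2 := words.filter
    (fun word => PySem.Set.contains first_letters ((PySem.Str.pyGet? word 0).getD ' '))
  puzzles.foldl (fun valid_words puzzle =>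
    let letters : PySem.Set Char := PySem.Set.ofList puzzle.toList
    let num_words := words2.foldl
      (fun n word =>
        if pvAInner letters word (PySem.List.pyRange 1 (PySem.Str.len word)) then n + 1 else n)
      (0 : Int)
    valid_words ++ [num_words]) []

-- ===== PORT B =====
-- ''.join(sorted(set(word[1:]))) — canonical string of the distinct letters of word[1:]
def pvKey (word : String) : String :=
  String.ofList (PySem.List.sorted (PySem.Set.ofList (PySem.List.slice word.toList (some 1))) (fun c => c) false)

def num_valid_words_alt (words : List String) (puzzles : List String) : List Int :=
  let first_letters : PySem.Set Char :=
    PySem.Set.ofList (puzzles.map (fun puzzle => (PySem.Str.pyGet? puzzle 0).getD ' '))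
  let counts : PySem.Dict String Int :=
    words.foldl (fun d word =>
      if PySem.Set.contains first_letters ((PySem.Str.pyGet? word 0).getD ' ') then
        d.insert (pvKey word) (d.getD (pvKey word) 0 + 1)
      else d) PySem.Dict.empty
  puzzles.map (fun puzzle =>
    let letters : PySem.Set Char := PySem.Set.ofList puzzle.toList
    counts.items.foldl (fun total kv =>
      if kv.1.toList.all (fun ch => PySem.Set.contains letters ch) then total + kv.2 else total)
      (0 : Int))

-- ===== PRECONDITION & SPEC =====
-- Pre_ excludes exactly the inputs on which Python A raises IndexError: an empty string among
-- the words or among the puzzles ('word[0]' / 'puzzle[0]').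
def Pre_num_valid_words (words : List String) (puzzles : List String) : Prop :=
  (∀ w ∈ words, w.toList ≠ []) ∧ (∀ p ∈ puzzles, p.toList ≠ [])
instance (words : List String) (puzzles : List String) : Decidable (Pre_num_valid_words words puzzles) := by unfold Pre_num_valid_words; infer_instance
def pvWitness_num_valid_words : List String × List String := (["apple", "ax", "lep"], ["aelwp", "xz"])

def Spec_num_valid_words (words : List String) (puzzles : List String) (out : List Int) : Prop := out = num_valid_words_alt words puzzles
instance (words : List String) (puzzles : List String) (out : List Int) : Decidable (Spec_num_valid_words words puzzles out) := by unfold Spec_num_valid_words; infer_instance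

-- ===== CLAIM (what is proved, stated in full; the proofs are below) =====
def Claim_equal_num_valid_words : Prop := ∀ (words : List String) (puzzles : List String), Dom_num_valid_words words puzzles → Pre_num_valid_words words puzzles → Spec_num_valid_words words puzzles (num_valid_words words puzzles)

-- ===== LEMMAS AND PROOFS =====

-- A's inner loop over range(1, len(w)) just checks every char of w[1:]
lemma pvAInner_nil (letters : PySem.Set Char) (w : String) {j : Nat}
    (hj : w.toList.length ≤ j) :
    pvAInner letters w (PySem.List.pyRange (j : Int) (PySem.Str.len w))
      = (w.toList.drop j).all (fun c => PySem.Set.contains letters c) := by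
  have hr : PySem.List.pyRange (j : Int) (PySem.Str.len w) = [] := by
    rw [List.eq_nil_iff_forall_not_mem]
    intro x hx
    rw [PySem.List.mem_pyRange_one, PySem.Str.len_eq] at hx
    omega
  rw [hr, List.drop_eq_nil_of_le hj]
  rfl

lemma pvAInner_aux (letters : PySem.Set Char) (w : String) :
    ∀ (m j : Nat), w.toList.length ≤ j + m →
      pvAInner letters w (PySem.List.pyRange (j : Int) (PySem.Str.len w))
        = (w.toList.drop j).all (fun c => PySem.Set.contains letters c) := by
  intro m
  induction m with
  | zero => intro j hj; exact pvAInner_nil letters w (by omega)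
  | succ m ih =>
    intro j hj
    by_cases hlt : j < w.toList.length
    · have hcast : (j : Int) < PySem.Str.len w := by rw [PySem.Str.len_eq]; exact_mod_cast hlt
      rw [PySem.List.pyRange_one_cons hcast]
      have hget : PySem.Str.pyGet? w (j : Int) = some (w.toList[j]) := by
        rw [PySem.Str.pyGet?_natCast]; exact List.getElem?_eq_getElem hlt
      have hdrop : w.toList.drop j = w.toList[j] :: w.toList.drop (j + 1) :=
        List.drop_eq_getElem_cons hlt
      have hrec := ih (j + 1) (by omega)
      rw [show ((j : Int) + 1) = ((j + 1 : Nat) : Int) by push_cast; ring]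
      simp only [pvAInner, hget, hdrop, List.all_cons, hrec]
      cases PySem.Set.contains letters (w.toList[j]) <;> simp
    · exact pvAInner_nil letters w (by omega)

lemma pvAInner_eq (letters : PySem.Set Char) (w : String) :
    pvAInner letters w (PySem.List.pyRange 1 (PySem.Str.len w))
      = (w.toList.drop 1).all (fun c => PySem.Set.contains letters c) := by
  have h := pvAInner_aux letters w w.toList.length 1 (by omega)
  simpa using h

-- the canonical key has exactly the letters of w[1:]
lemma pvKey_all (letters : PySem.Set Char) (w : String) :
    (pvKey w).toList.all (fun ch => PySem.Set.contains letters ch)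
      = (w.toList.drop 1).all (fun c => PySem.Set.contains letters c) := by
  rw [Bool.eq_iff_iff]
  simp [pvKey, List.all_eq_true, String.toList_ofList, PySem.List.mem_sorted, PySem.Set.mem_ofList,
    PySem.List.slice_from w.toList (by norm_num : (0 : Int) ≤ 1)]

-- 'for x in l: if P x: total += v x' is the sum of the guarded values
lemma pvFoldlIfAdd {α : Type} (P : α → Bool) (v : α → Int) (l : List α) (a : Int) :
    l.foldl (fun t x => if P x then t + v x else t) a
      = a + (l.map (fun x => if P x then v x else 0)).sum := by
  induction l generalizing a with
  | nil => simp
  | cons x l ih =>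
    simp only [List.foldl_cons, List.map_cons, List.sum_cons, ih]
    by_cases h : P x <;> simp [h] <;> ring

lemma pvSumIndicator {ys : List String} (hnd : ys.Nodup) {x : String} (hx : x ∈ ys) (δ : Int) :
    (ys.map (fun k => if k = x then δ else 0)).sum = δ := by
  induction ys with
  | nil => cases hx
  | cons y ys ih =>
    rcases List.mem_cons.mp hx with h | h
    · subst h
      have hnx : x ∉ ys := (List.nodup_cons.mp hnd).1
      have : (ys.map (fun k => if k = x then δ else 0)).sum = 0 := by
        apply List.sum_eq_zero
        intro z hz
        rcases List.mem_map.mp hz with ⟨k, hk, rfl⟩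
        simp [show k ≠ x from fun h => hnx (h ▸ hk)]
      simp [this]
    · have hne : y ≠ x := by
        rintro rfl; exact (List.nodup_cons.mp hnd).1 h
      simp [hne, ih (List.nodup_cons.mp hnd).2 h]

-- summing the multiplicities of the keys satisfying ok over the distinct keys counts ks by ok
lemma pvSumCount (ok : String → Bool) (ks ys : List String) (hnd : ys.Nodup)
    (hsub : ∀ x ∈ ks, x ∈ ys) :
    (ys.map (fun k => if ok k then (ks.count k : Int) else 0)).sum = (ks.countP ok : Int) := by
  induction ks with
  | nil => simp
  | cons x ks ih =>
    have hx : x ∈ ys := hsub x List.mem_cons_self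
    have hsub' : ∀ y ∈ ks, y ∈ ys := fun y hy => hsub y (List.mem_cons_of_mem x hy)
    have hpt : ys.map (fun k => if ok k then ((x :: ks).count k : Int) else 0)
        = ys.map (fun k => (if ok k then (ks.count k : Int) else 0)
            + (if k = x then (if ok x then (1 : Int) else 0) else 0)) := by
      apply List.map_congr_left
      intro k _
      by_cases hkx : k = x
      · subst hkx
        by_cases hok : ok k <;> simp [hok, List.count_cons] <;> push_cast <;> ring
      · have hxk : x ≠ k := fun h => hkx h.symm
        simp [List.count_cons, hkx, hxk]
    rw [hpt, PySem.List.sum_map_add_int, ih hsub', pvSumIndicator hnd hx, List.countP_cons]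
    by_cases hok : ok x <;> simp [hok] <;> push_cast <;> ring

-- B's guarded counting loop IS the counter of the canonical keys of the kept words
lemma pvCounts_eq (words : List String) (pred : String → Bool) :
    words.foldl (fun d word =>
        if pred word then d.insert (pvKey word) (d.getD (pvKey word) 0 + 1) else d)
        PySem.Dict.empty
      = PySem.Dict.counter ((words.filter pred).map pvKey) := by
  rw [← PySem.Dict.foldl_insert_getD_add_one_eq_counter, List.foldl_map, List.foldl_filter]

-- the heart: A's per-puzzle scan of the words equals B's per-puzzle scan of the counter items
lemma pvPerPuzzle (letters : PySem.Set Char) (ws : List String) :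
    ws.foldl (fun n word =>
        if pvAInner letters word (PySem.List.pyRange 1 (PySem.Str.len word)) then n + 1 else n)
        (0 : Int)
      = (PySem.Dict.counter (ws.map pvKey)).items.foldl (fun total kv =>
          if kv.1.toList.all (fun ch => PySem.Set.contains letters ch) then total + kv.2 else total)
          (0 : Int) := by
  rw [PySem.List.foldl_if_add_one, PySem.Dict.items_counter, List.foldl_map]
  simp only []
  rw [pvFoldlIfAdd (fun k => k.toList.all (fun ch => PySem.Set.contains letters ch))
      (fun k => ((ws.map pvKey).count k : Int))]
  rw [pvSumCount _ (ws.map pvKey) _ (PySem.Set.nodup_ofList _)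
      (fun x hx => (PySem.Set.mem_ofList _ _).mpr hx)]
  congr 1
  rw [List.countP_map]
  apply congrArg
  apply List.countP_congr
  intro w _
  rw [pvAInner_eq, Function.comp_apply, pvKey_all]

-- ===== VERDICT (by name: the statement is the Claim_ definition above) =====
theorem num_valid_words_spec : Claim_equal_num_valid_words := by
  intro words puzzles _ _
  unfold Spec_num_valid_words num_valid_words num_valid_words_alt
  simp only [PySem.List.foldl_append_singleton_eq_map, List.nil_append, pvCounts_eq]
  apply List.map_congr_left
  intro puzzle _
  exact pvPerPuzzle _ _
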